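-- pv_equiv track=rewrite | github.com/Kinrokin/KT | KT_PROD_CLEANROOM/tools/growth/analyze_autonomous_run.py | transition_stats
-- ===== SOURCE A (Python) =====
-- from collections import Counter, defaultdict
--
-- def transition_stats(records):
--     transitions = Counter()
--     prev_plan = None
--     for rec in records:
--         plan = rec["plan_run"]
--         if prev_plan is not None:
--             transitions[(prev_plan, plan)] += 1
--         prev_plan = plan
--     return transitions
-- ===== SOURCE B (Python) =====
-- from collections import Counter
--
-- def transition_stats(records):
--     plans = [rec["plan_run"] for rec in records]
--     pairs = list(zip(plans, plans[1:]))
--     # count each distinct pair by a dedicated scan, in first-occurrence order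
--     return Counter({p: pairs.count(p) for p in dict.fromkeys(pairs)})
-- ===== Notes on version B (the rewrite author's own statement) =====
-- stated objective: alternative
-- what changed: B abandons the incremental counting accumulator entirely: it materializes the adjacent-pair list, dedupes it to first occurrences, and computes each distinct pair's count by a separate list.count scan (per-key counting instead of a running Counter).
import Mathlib
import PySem

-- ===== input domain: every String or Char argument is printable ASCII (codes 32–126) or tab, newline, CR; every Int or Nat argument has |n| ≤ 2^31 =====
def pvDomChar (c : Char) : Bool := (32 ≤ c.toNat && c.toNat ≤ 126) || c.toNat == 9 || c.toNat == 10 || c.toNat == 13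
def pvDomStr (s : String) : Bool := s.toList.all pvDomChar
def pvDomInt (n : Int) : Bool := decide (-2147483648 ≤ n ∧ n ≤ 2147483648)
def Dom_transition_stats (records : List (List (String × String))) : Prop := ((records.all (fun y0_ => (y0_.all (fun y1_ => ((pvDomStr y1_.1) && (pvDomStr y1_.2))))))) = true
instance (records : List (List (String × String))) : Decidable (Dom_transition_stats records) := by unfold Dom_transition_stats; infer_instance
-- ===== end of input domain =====

-- B drops the running Counter accumulator: it dedupes the adjacent-pair list to first
-- occurrences and counts each distinct pair by its own list.count scan; alternative, same result.

-- ===== PORT A =====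
-- one step of A's loop body; the 'none' branch of the lookup is a KeyError in Python (excluded by Pre_)
def tsStepA (st : PySem.Dict (String × String) Int × Option String) (rec : List (String × String)) :
    PySem.Dict (String × String) Int × Option String :=
  match (PySem.Dict.mk rec).get? "plan_run" with
  | none => st
  | some plan =>
    match st.2 with
    | none => (st.1, some plan)
    | some prev => (st.1.modify (prev, plan) 0 (· + 1), some plan)

def transition_stats (records : List (List (String × String))) : List (String × String × Int) :=
  ((records.foldl tsStepA (PySem.Dict.empty, none)).1.items).map (fun kv => (kv.1.1, kv.1.2, kv.2))

-- ===== PORT B =====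
def transition_stats_alt (records : List (List (String × String))) : List (String × String × Int) :=
  let plans := records.map (fun rec => ((PySem.Dict.mk rec).get? "plan_run").getD "")
  let pairs := plans.zip plans.tail
  (PySem.Set.ofList pairs).map (fun p => (p.1, p.2, (pairs.count p : Int)))

-- ===== PRECONDITION & SPEC =====
-- Pre_ excludes exactly the records missing the key "plan_run", on which A raises KeyError.
def Pre_transition_stats (records : List (List (String × String))) : Prop :=
  ∀ rec ∈ records, "plan_run" ∈ rec.map Prod.fst
instance (records : List (List (String × String))) : Decidable (Pre_transition_stats records) := by unfold Pre_transition_stats; infer_instance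

def pvWitness_transition_stats : (List (List (String × String))) :=
  [[("plan_run", "a")], [("plan_run", "b")], [("plan_run", "a")], [("plan_run", "b")]]

def Spec_transition_stats (records : List (List (String × String))) (out : List (String × String × Int)) : Prop := out = transition_stats_alt records
instance (records : List (List (String × String))) (out : List (String × String × Int)) : Decidable (Spec_transition_stats records out) := by unfold Spec_transition_stats; infer_instance

-- ===== CLAIM (what is proved, stated in full; the proofs are below) =====
def Claim_equal_transition_stats : Prop := ∀ (records : List (List (String × String))), Dom_transition_stats records → Pre_transition_stats records → Spec_transition_stats records (transition_stats records)

-- ===== LEMMAS AND PROOFS =====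

-- A's loop restated on the extracted plan sequence
def tsStepP (st : PySem.Dict (String × String) Int × Option String) (x : String) :
    PySem.Dict (String × String) Int × Option String :=
  match st.2 with
  | none => (st.1, some x)
  | some prev => (st.1.modify (prev, x) 0 (· + 1), some x)

theorem tsStepA_eq_some (st : PySem.Dict (String × String) Int × Option String)
    (rec : List (String × String)) (hp : "plan_run" ∈ rec.map Prod.fst) :
    tsStepA st rec = tsStepP st (((PySem.Dict.mk rec).get? "plan_run").getD "") := by
  have hc : (PySem.Dict.mk rec).get? "plan_run" ≠ none := by
    rw [Ne, PySem.Dict.get?_eq_none_iff_contains]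
    rw [PySem.Dict.contains_mk]
    obtain ⟨⟨k, v⟩, hm, hk⟩ := List.mem_map.mp hp
    simp only [Bool.not_eq_false, List.any_eq_true]
    exact ⟨(k, v), hm, by simp_all⟩
  obtain ⟨p, hp'⟩ := Option.ne_none_iff_exists'.mp hc
  simp [tsStepA, tsStepP, hp']

theorem tsLoopP_some (xs : List String) :
    ∀ (d : PySem.Dict (String × String) Int) (p : String),
    (xs.foldl tsStepP (d, some p)).1 =
      (((p :: xs).zip xs).foldl (fun d q => d.modify q 0 (· + 1)) d) := by
  induction xs with
  | nil => intro d p; rfl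
  | cons x xs ih =>
    intro d p
    simpa [tsStepP] using ih (d.modify (p, x) 0 (· + 1)) x

-- ===== VERDICT (by name: the statement is the Claim_ definition above) =====
theorem transition_stats_spec : Claim_equal_transition_stats := by
  intro records _ hpre
  unfold Spec_transition_stats transition_stats transition_stats_alt
  have h1 : records.foldl tsStepA (PySem.Dict.empty, none) =
      (records.map (fun rec => ((PySem.Dict.mk rec).get? "plan_run").getD "")).foldl tsStepP
        (PySem.Dict.empty, none) := by
    rw [List.foldl_map]
    exact PySem.List.foldl_congr_mem _ _ _ _ (fun st rec hrec => tsStepA_eq_some st rec (hpre rec hrec))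
  rw [h1]
  cases hmap : records.map (fun rec => ((PySem.Dict.mk rec).get? "plan_run").getD "") with
  | nil => rfl
  | cons q rest =>
    simp only [List.foldl_cons, tsStepP, List.tail_cons]
    rw [tsLoopP_some, ← PySem.Dict.counter_eq_foldl, PySem.Dict.items_counter, List.map_map]
    rfl
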